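-- pv_equiv track=rewrite | github.com/pkitslaar/AdventOfCode | 2017/day 17/day_17.py | spinlock_zeros
-- ===== SOURCE A (Python) =====
-- def spinlock_zeros(step_size, N=2017):
--     current_pos = 0
--     zero_value = 0
--     for i in range(1,N+1):
--         current_pos = (current_pos + step_size) % (i)
--         if current_pos == 0:
--             zero_value = i
--         current_pos += 1
--     return zero_value
-- ===== SOURCE B (Python) =====
-- def spinlock_zeros(step_size, N=2017):
--     zero_value = 0
--     pos = 0
--     i = 1
--     while i <= N:
--         pos = (pos + step_size) % i
--         if pos == 0:
--             zero_value = i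
--         pos += 1
--         # batch-skip the following iterations that provably neither wrap
--         # around the buffer end nor land on index 0 (possible only for a
--         # positive step): during such a run pos just grows by step_size+1.
--         if step_size > 0:
--             skip = max(0, min((i - pos) // step_size, N - i))
--         else:
--             skip = 0
--         pos += skip * (step_size + 1)
--         i += skip + 1
--     return zero_value
-- ===== Notes on version B (the rewrite author's own statement) =====
-- stated objective: alternative
-- what changed: Replaced A's per-iteration simulation with a loop that arithmetically batch-skips whole runs of iterations that neither wrap modulo i nor land on index 0 (only wrap events are simulated); it trades a large win when step_size is small relative to N against extra per-iteration arithmetic in the wrap-heavy regime step_size >= N, where a timing run draws its inputs.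
import Mathlib
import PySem

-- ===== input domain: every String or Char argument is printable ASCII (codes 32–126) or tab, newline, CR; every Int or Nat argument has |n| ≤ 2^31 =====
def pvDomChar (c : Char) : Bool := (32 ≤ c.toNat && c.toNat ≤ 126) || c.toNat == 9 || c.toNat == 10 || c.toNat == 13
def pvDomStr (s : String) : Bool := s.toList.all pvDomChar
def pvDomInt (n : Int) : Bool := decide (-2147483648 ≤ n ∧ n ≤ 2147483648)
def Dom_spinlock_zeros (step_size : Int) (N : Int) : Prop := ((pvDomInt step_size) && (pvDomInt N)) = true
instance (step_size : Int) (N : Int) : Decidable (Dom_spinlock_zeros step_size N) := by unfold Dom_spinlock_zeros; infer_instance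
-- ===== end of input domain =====

-- B replaces A's per-iteration simulation by arithmetic batch-skipping of the runs of
-- iterations that neither wrap nor hit index 0; only wrap events are simulated
-- (objective: alternative algorithm; not measurably faster on the probe's inputs).

-- ===== PORT A =====
-- one iteration of A's for-body over the state (current_pos, zero_value)
def spinAStep (step_size : Int) (s : Int × Int) (i : Int) : Int × Int :=
  let p := PySem.Int.mod (s.1 + step_size) i
  (p + 1, if p = 0 then i else s.2)

def spinlock_zeros (step_size : Int) (N : Int) : Int :=
  ((PySem.List.pyRange 1 (N + 1) 1).foldl (spinAStep step_size) (0, 0)).2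

-- ===== PORT B =====
-- the batch size B's while-body computes (0 when step_size ≤ 0)
def spinSkip (step_size : Int) (N : Int) (i : Int) (pos : Int) : Int :=
  if step_size > 0 then max 0 (min (PySem.Int.floordiv (i - pos) step_size) (N - i)) else 0

theorem spinSkip_nonneg (step_size N i pos : Int) : 0 ≤ spinSkip step_size N i pos := by
  unfold spinSkip; split <;> simp

def spinBLoop (step_size : Int) (N : Int) (i : Int) (pos : Int) (z : Int) : Int :=
  if _h : i ≤ N then
    let pos1 := PySem.Int.mod (pos + step_size) i
    let z1 := if pos1 = 0 then i else z
    let pos2 := pos1 + 1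
    let skip := spinSkip step_size N i pos2
    spinBLoop step_size N (i + skip + 1) (pos2 + skip * (step_size + 1)) z1
  else z
termination_by (N + 1 - i).toNat
decreasing_by
  have := spinSkip_nonneg step_size N i (PySem.Int.mod (pos + step_size) i + 1)
  omega

def spinlock_zeros_alt (step_size : Int) (N : Int) : Int :=
  spinBLoop step_size N 1 0 0

-- ===== PRECONDITION & SPEC =====
def Spec_spinlock_zeros (step_size : Int) (N : Int) (out : Int) : Prop := out = spinlock_zeros_alt step_size N
instance (step_size : Int) (N : Int) (out : Int) : Decidable (Spec_spinlock_zeros step_size N out) := by unfold Spec_spinlock_zeros; infer_instance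

-- ===== CLAIM (what is proved, stated in full; the proofs are below) =====
def Claim_equal_spinlock_zeros : Prop := ∀ (step_size : Int) (N : Int), Dom_spinlock_zeros step_size N → Spec_spinlock_zeros step_size N (spinlock_zeros step_size N)

-- ===== LEMMAS AND PROOFS =====

-- a non-wrapping, non-zero-hitting run of k iterations of A's body moves pos linearly
theorem spin_batch (step_size : Int) (hs : 1 ≤ step_size) :
    ∀ (k : Nat) (i pos z : Int), 1 ≤ pos → 1 ≤ i → pos + k * step_size ≤ i →
      (PySem.List.pyRange (i + 1) (i + 1 + k) 1).foldl (spinAStep step_size) (pos, z)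
        = (pos + k * (step_size + 1), z) := by
  intro k
  induction k with
  | zero =>
      intro i pos z _ _ _
      rw [PySem.List.pyRange_one_eq_nil (by omega)]
      simp
  | succ k ih =>
      intro i pos z hp hi hb
      have hk1 : ((k : Int) + 1) * step_size = k * step_size + step_size := by ring
      have hps : pos + step_size ≤ i := by
        have : (0:Int) ≤ k * step_size := by positivity
        push_cast at hb; nlinarith
      rw [PySem.List.pyRange_one_cons (by push_cast; omega)]
      simp only [List.foldl_cons]
      have hstep : spinAStep step_size (pos, z) (i + 1) = (pos + step_size + 1, z) := by
        unfold spinAStep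
        have hmod : PySem.Int.mod (pos + step_size) (i + 1) = pos + step_size := by
          rw [PySem.Int.mod_eq_emod_of_pos (by omega)]
          exact Int.emod_eq_of_lt (by omega) (by omega)
        simp only [hmod]
        have : ¬ (pos + step_size = 0) := by omega
        simp [this]
      rw [hstep]
      have := ih (i + 1) (pos + step_size + 1) z (by omega) (by omega)
        (by push_cast at hb ⊢; nlinarith)
      have harg : i + 1 + ((k : Int) + 1) = (i + 1) + 1 + k := by ring
      push_cast [harg]
      push_cast at this
      rw [this]
      rw [Prod.mk.injEq]
      exact ⟨by ring, rfl⟩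

-- B's skipping loop computes the tail of A's fold, for any start i ≥ 1
theorem spin_main (step_size N : Int) :
    ∀ (i pos z : Int), 1 ≤ i →
      spinBLoop step_size N i pos z
        = ((PySem.List.pyRange i (N + 1) 1).foldl (spinAStep step_size) (pos, z)).2 := by
  intro i pos z hi
  induction hfuel : (N + 1 - i).toNat using Nat.strong_induction_on generalizing i pos z with
  | _ fuel ih =>
  by_cases h : i ≤ N
  · rw [spinBLoop]
    simp only [h, dif_pos]
    set pos1 := PySem.Int.mod (pos + step_size) i with hpos1
    set pos2 := pos1 + 1 with hpos2
    set skip := spinSkip step_size N i pos2 with hskip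
    have hsk0 : 0 ≤ skip := spinSkip_nonneg _ _ _ _
    have hskN : skip ≤ N - i := by
      rw [hskip]; unfold spinSkip; split <;> omega
    have hp1lo : 0 ≤ pos1 := PySem.Int.mod_nonneg _ (by omega)
    have hp1hi : pos1 < i := PySem.Int.mod_lt _ (by omega)
    -- skip * step_size ≤ i - pos2  (trivial when step_size ≤ 0, since skip = 0)
    have hbound : pos2 + skip * step_size ≤ i := by
      by_cases hst : step_size > 0
      · have hfd0 : 0 ≤ PySem.Int.floordiv (i - pos2) step_size := by
          rw [(PySem.Int.le_floordiv_iff_mul_le (a := i - pos2) (b := step_size) (q := 0) hst)]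
          omega
        have hle : skip ≤ PySem.Int.floordiv (i - pos2) step_size := by
          rw [hskip]; unfold spinSkip; rw [if_pos hst]; omega
        have := (PySem.Int.le_floordiv_iff_mul_le (a := i - pos2) (b := step_size) (q := skip) hst).mp hle
        omega
      · have : skip = 0 := by rw [hskip]; unfold spinSkip; simp [hst]
        simp [this]; omega
    -- unroll A's first iteration
    rw [PySem.List.pyRange_one_cons (by omega)]
    simp only [List.foldl_cons]
    have hstep : spinAStep step_size (pos, z) i = (pos2, if pos1 = 0 then i else z) := by
      unfold spinAStep; rfl
    rw [hstep]
    -- split the remaining range at i + 1 + skip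
    rw [PySem.List.pyRange_one_append (i + 1) (i + 1 + skip) (N + 1) (by omega) (by omega)]
    rw [List.foldl_append]
    -- first chunk
    have hchunk :
        (PySem.List.pyRange (i + 1) (i + 1 + skip) 1).foldl (spinAStep step_size)
            (pos2, if pos1 = 0 then i else z)
          = (pos2 + skip * (step_size + 1), if pos1 = 0 then i else z) := by
      by_cases hst : step_size > 0
      · have hcast : i + 1 + skip = i + 1 + (skip.toNat : Int) := by omega
        rw [hcast]
        rw [spin_batch step_size (by omega) skip.toNat i pos2 (if pos1 = 0 then i else z)
          (by omega) (by omega) (by rw [Int.toNat_of_nonneg hsk0]; exact hbound)]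
        rw [Int.toNat_of_nonneg hsk0]
      · have hz : skip = 0 := by rw [hskip]; unfold spinSkip; simp [hst]
        rw [hz]; simp
    rw [hchunk]
    -- recurse
    have hre : i + 1 + skip = i + skip + 1 := by ring
    rw [hre]
    exact ih (N + 1 - (i + skip + 1)).toNat (by omega) (i + skip + 1)
      (pos2 + skip * (step_size + 1)) (if pos1 = 0 then i else z) (by omega) rfl
  · rw [spinBLoop]
    simp only [h, dif_neg, not_false_iff]
    rw [PySem.List.pyRange_one_eq_nil (by omega)]
    simp

-- ===== VERDICT (by name: the statement is the Claim_ definition above) =====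
theorem spinlock_zeros_spec : Claim_equal_spinlock_zeros := by
  intro step_size N _
  unfold Spec_spinlock_zeros spinlock_zeros spinlock_zeros_alt
  exact (spin_main step_size N 1 0 0 (by omega)).symm
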